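-- pv_equiv track=rewrite | github.com/seb07uk/WEB-2-EXE-Compiler | HTA-2-EXE v1.0 Mini/HTA-2-EXE.py | _find_hta_entry
-- ===== SOURCE A (Python) =====
-- def _find_hta_entry(files: dict) -> str:
--     for k in files:
--         if k.endswith(".hta"):
--             return k
--     for k in files:
--         if k.endswith((".html", ".htm")):
--             return k
--     raise ValueError("Nie znaleziono pliku .HTA w projekcie!")
-- ===== SOURCE B (Python) =====
-- def _find_hta_entry(files: dict) -> str:
--     candidates = [k for k in files if k.endswith((".hta", ".html", ".htm"))]
--     if not candidates:
--         raise ValueError("Nie znaleziono pliku .HTA w projekcie!")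
--     return min(candidates, key=lambda k: not k.endswith(".hta"))
-- ===== Notes on version B (the rewrite author's own statement) =====
-- stated objective: alternative
-- what changed: Replaces A's two sequential early-return scans with a rank-and-select: filter all candidate keys once, then take the stable minimum under the boolean rank 'is not .hta', so the first .hta key wins and otherwise the first .html/.htm key.
import Mathlib
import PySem

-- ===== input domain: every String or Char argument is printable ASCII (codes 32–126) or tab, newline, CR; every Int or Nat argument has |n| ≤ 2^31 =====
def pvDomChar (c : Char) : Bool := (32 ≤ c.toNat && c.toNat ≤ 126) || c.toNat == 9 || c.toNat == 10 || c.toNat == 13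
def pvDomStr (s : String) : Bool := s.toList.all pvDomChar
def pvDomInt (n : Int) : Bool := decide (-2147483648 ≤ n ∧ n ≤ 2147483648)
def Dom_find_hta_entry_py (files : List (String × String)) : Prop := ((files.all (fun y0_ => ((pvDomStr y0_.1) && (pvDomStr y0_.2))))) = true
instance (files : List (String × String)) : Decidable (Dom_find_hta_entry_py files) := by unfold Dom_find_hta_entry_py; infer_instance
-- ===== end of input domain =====

-- B ranks candidates and takes a stable minimum instead of A's two early-return scans; objective: alternative.
-- A raises ValueError when no key matches; Pre_ excludes exactly those inputs.

-- ===== PORT A =====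
-- first loop of A: return the first key ending in ".hta"
def aLoopHta : List (String × String) → Option String
  | [] => none
  | (k, _) :: rest =>
      if PySem.Str.endswith k ".hta" then some k else aLoopHta rest

-- second loop of A: return the first key ending in ".html" or ".htm"
def aLoopHtml : List (String × String) → Option String
  | [] => none
  | (k, _) :: rest =>
      if PySem.Str.endswith k ".html" || PySem.Str.endswith k ".htm" then some k
      else aLoopHtml rest

def find_hta_entry_py (files : List (String × String)) : String :=
  match aLoopHta files with
  | some k => k
  | none =>
      match aLoopHtml files with
      | some k => k
      | none => ""   -- Python raises ValueError here; excluded by Pre_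

-- ===== PORT B =====
-- Source B: candidates = [k for k in files if k.endswith((".hta",".html",".htm"))]
def bIsCand (k : String) : Bool :=
  PySem.Str.endswith k ".hta" || PySem.Str.endswith k ".html" || PySem.Str.endswith k ".htm"

def bCandidates (files : List (String × String)) : List String :=
  (files.map Prod.fst).filter bIsCand

-- Source B: min(candidates, key=lambda k: not k.endswith(".hta"))  (min on [] ↔ the ValueError branch)
def find_hta_entry_py_alt (files : List (String × String)) : String :=
  match PySem.List.min? (bCandidates files) (fun k => !PySem.Str.endswith k ".hta") with
  | some k => k
  | none => ""   -- Python raises ValueError here; excluded by Pre_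

-- ===== PRECONDITION & SPEC =====
-- Pre_ excludes exactly the inputs where Python A raises ValueError: no key ends in ".hta", ".html" or ".htm".
def Pre_find_hta_entry_py (files : List (String × String)) : Prop :=
  files.any (fun p => PySem.Str.endswith p.1 ".hta" || PySem.Str.endswith p.1 ".html" || PySem.Str.endswith p.1 ".htm") = true
instance (files : List (String × String)) : Decidable (Pre_find_hta_entry_py files) := by unfold Pre_find_hta_entry_py; infer_instance

def pvWitness_find_hta_entry_py : (List (String × String)) := [("index.hta", "x")]

def Spec_find_hta_entry_py (files : List (String × String)) (out : String) : Prop := out = find_hta_entry_py_alt files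
instance (files : List (String × String)) (out : String) : Decidable (Spec_find_hta_entry_py files out) := by unfold Spec_find_hta_entry_py; infer_instance

-- ===== CLAIM (what is proved, stated in full; the proofs are below) =====
def Claim_equal_find_hta_entry_py : Prop := ∀ (files : List (String × String)), Dom_find_hta_entry_py files → Pre_find_hta_entry_py files → Spec_find_hta_entry_py files (find_hta_entry_py files)

-- ===== LEMMAS AND PROOFS =====

-- the fold step min? performs (its definition, named for the proofs)
def minStep (acc : Option String) (x : String) : Option String :=
  match acc with
  | none => some x
  | some m =>
      if (!PySem.Str.endswith x ".hta") < (!PySem.Str.endswith m ".hta") then some x else some m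

theorem min?_eq_foldl (xs : List String) :
    PySem.List.min? xs (fun k => !PySem.Str.endswith k ".hta") = xs.foldl minStep none := by
  unfold PySem.List.min?
  congr 1
  funext acc x
  cases acc <;> rfl

theorem minStep_hta_keep (m x : String) (hm : PySem.Str.endswith m ".hta" = true) :
    minStep (some m) x = some m := by
  simp only [minStep]
  rw [hm]
  cases hx : PySem.Str.endswith x ".hta" <;> simp

theorem minStep_take (m x : String) (hm : PySem.Str.endswith m ".hta" = false)
    (hx : PySem.Str.endswith x ".hta" = true) : minStep (some m) x = some x := by
  simp only [minStep]; rw [hm, hx]; simp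

theorem minStep_keep (m x : String) (hm : PySem.Str.endswith m ".hta" = false)
    (hx : PySem.Str.endswith x ".hta" = false) : minStep (some m) x = some m := by
  simp only [minStep]; rw [hm, hx]; simp

-- once the accumulator holds a ".hta" key, the fold never changes it
theorem foldl_keep_hta (c : List String) (m : String)
    (hm : PySem.Str.endswith m ".hta" = true) :
    c.foldl minStep (some m) = some m := by
  induction c with
  | nil => rfl
  | cons x r ih => rw [List.foldl_cons, minStep_hta_keep m x hm]; exact ih

-- with an html fallback in the accumulator, the fold over the filtered tail returns the
-- first ".hta" key of the tail if any, else keeps the fallback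
theorem foldl_fallback (rest : List (String × String)) (m : String)
    (hm : PySem.Str.endswith m ".hta" = false) :
    (bCandidates rest).foldl minStep (some m) =
      match aLoopHta rest with
      | some k => some k
      | none => some m := by
  induction rest with
  | nil => rfl
  | cons p r ih =>
      obtain ⟨x, v⟩ := p
      simp only [bCandidates, List.map_cons, List.filter_cons, aLoopHta] at ih ⊢
      by_cases hx : PySem.Str.endswith x ".hta" = true
      · have hp : bIsCand x = true := by unfold bIsCand; rw [hx]; simp
        rw [if_pos hp, if_pos hx, List.foldl_cons, minStep_take m x hm hx]
        exact foldl_keep_hta _ x hx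
      · have hx' : PySem.Str.endswith x ".hta" = false := by simpa using hx
        rw [if_neg hx]
        by_cases hc : bIsCand x = true
        · rw [if_pos hc, List.foldl_cons, minStep_keep m x hm hx']
          exact ih
        · rw [if_neg hc]; exact ih

-- the whole B fold equals A's two staged scans
theorem min?_eq_scans (files : List (String × String)) :
    PySem.List.min? (bCandidates files) (fun k => !PySem.Str.endswith k ".hta") =
      match aLoopHta files with
      | some k => some k
      | none => aLoopHtml files := by
  rw [min?_eq_foldl]
  induction files with
  | nil => rfl
  | cons p r ih =>
      obtain ⟨x, v⟩ := p
      simp only [bCandidates, List.map_cons, List.filter_cons, aLoopHta, aLoopHtml] at ih ⊢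
      by_cases hx : PySem.Str.endswith x ".hta" = true
      · have hp : bIsCand x = true := by unfold bIsCand; rw [hx]; simp
        rw [if_pos hp, if_pos hx, List.foldl_cons]
        show List.foldl minStep (some x) _ = some x
        exact foldl_keep_hta _ x hx
      · have hx' : PySem.Str.endswith x ".hta" = false := by simpa using hx
        rw [if_neg hx]
        by_cases hh : (PySem.Str.endswith x ".html" || PySem.Str.endswith x ".htm") = true
        · have hp : bIsCand x = true := by
            unfold bIsCand; rw [hx', Bool.or_assoc]; rw [hh]; simp
          rw [if_pos hp, if_pos hh, List.foldl_cons]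
          show List.foldl minStep (some x) _ = _
          exact foldl_fallback r x hx'
        · have hp : bIsCand x = false := by
            unfold bIsCand
            rw [hx', Bool.or_assoc]
            simpa using hh
          rw [if_neg (by simp [hp] : ¬ bIsCand x = true), if_neg hh]
          exact ih

-- ===== VERDICT (by name: the statement is the Claim_ definition above) =====
theorem find_hta_entry_py_spec : Claim_equal_find_hta_entry_py := by
  intro files _ _
  unfold Spec_find_hta_entry_py find_hta_entry_py find_hta_entry_py_alt
  rw [min?_eq_scans]
  cases aLoopHta files <;> cases aLoopHtml files <;> rfl
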